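-- pv_equiv track=rewrite | github.com/fridaychen/fconfig | python/fc/futil.py | get_stem
-- ===== SOURCE A (Python) =====
-- def get_prefix(words):
--     "Given a list of pathnames, returns the longest common leading component"
--     if not words:
--         return ""
--
--     s1 = min(words)
--     s2 = max(words)
--
--     for i, c in enumerate(s1):
--         if c != s2[i]:
--             return s1[:i]
--     return s1
--
-- def get_suffix(words):
--     "Given a list of pathnames, returns the longest common rear component"
--     if not words:
--         return ""
--
--     return get_prefix([x[::-1] for x in words])[::-1]
--
-- def get_stem(words):
--     """ get stem """
--     ret = list(words)
--
--     s = get_prefix(ret)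
--     if len(s) > 0:
--         ret = [x[len(s) :] for x in ret]
--
--     s = get_suffix(ret)
--     if len(s) > 0:
--         ret = [x[0 : len(x) - len(s)] for x in ret]
--
--     return ret
-- ===== SOURCE B (Python) =====
-- def get_stem(words):
--     """ get stem """
--     if not words:
--         return []
--     w0 = words[0]
--     n = min(len(w) for w in words)
--
--     def scan(limit, ok):
--         i = 0
--         while i < limit and ok(i):
--             i += 1
--         return i
--
--     p = scan(n, lambda i: all(w[i] == w0[i] for w in words))
--     s = scan(n - p, lambda i: all(w[len(w) - 1 - i] == w0[len(w0) - 1 - i] for w in words))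
--     return [w[p:len(w) - s] for w in words]
-- ===== Notes on version B (the rewrite author's own statement) =====
-- stated objective: alternative
-- what changed: B replaces A's min/max extremal-pair prefix scan and its reversed-copies suffix pass by two column-wise scans over all words that compute the common prefix and suffix lengths directly, then slices each word exactly once.
import Mathlib
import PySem

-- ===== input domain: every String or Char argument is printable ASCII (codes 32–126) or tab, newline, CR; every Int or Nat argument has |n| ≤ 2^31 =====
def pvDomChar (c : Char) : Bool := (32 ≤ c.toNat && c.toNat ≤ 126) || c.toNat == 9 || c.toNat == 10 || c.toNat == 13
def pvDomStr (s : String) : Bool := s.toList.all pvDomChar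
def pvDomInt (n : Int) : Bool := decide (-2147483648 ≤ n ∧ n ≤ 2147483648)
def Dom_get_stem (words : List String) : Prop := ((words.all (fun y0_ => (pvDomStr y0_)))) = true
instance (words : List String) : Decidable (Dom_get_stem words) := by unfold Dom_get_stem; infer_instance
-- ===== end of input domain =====

-- B computes the common prefix/suffix lengths by column-wise scans over all words and slices
-- each word once, instead of A's min/max extremal-pair prefix scan plus a reversed-copies
-- suffix pass (objective: alternative).

-- ===== PORT A =====
-- 'for i, c in enumerate(s1): if c != s2[i]: return s1[:i]' / 'return s1'
def prefLoopA (s1 s2 : List Char) (i : Nat) (rest : List Char) : List Char :=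
  match rest with
  | [] => s1
  | c :: cs =>
    match PySem.List.pyGet? s2 (i : Int) with
    | none => List.take i s1   -- s2[i] IndexError: unreachable for s1 = min(words), s2 = max(words)
    | some d => if c ≠ d then List.take i s1 else prefLoopA s1 s2 (i + 1) cs

def get_prefix_A (words : List String) : String :=
  if words = [] then ""
  else
    let s1 := ((PySem.List.min? words (fun x => x)).getD "").toList  -- min(words); getD unreachable
    let s2 := ((PySem.List.max? words (fun x => x)).getD "").toList  -- max(words); getD unreachable
    String.ofList (prefLoopA s1 s2 0 s1)

def get_suffix_A (words : List String) : String :=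
  if words = [] then ""
  else
    -- x[::-1] is reverse (PySem.Str.slice?_none_none_neg_one)
    String.ofList (get_prefix_A (words.map (fun x => String.ofList x.toList.reverse))).toList.reverse

def get_stem (words : List String) : List String :=
  let ret := words
  let s := get_prefix_A ret
  let ret := if 0 < s.length then
      ret.map (fun x => PySem.Str.slice x (some (s.length : Int)) none)   -- x[len(s):]
    else ret
  let s2 := get_suffix_A ret
  let ret := if 0 < s2.length then
      ret.map (fun x => PySem.Str.slice x (some 0) (some ((x.length : Int) - (s2.length : Int))))   -- x[0:len(x)-len(s)]
    else ret
  ret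

-- ===== PORT B =====
-- 'i = 0; while i < limit and ok(i): i += 1; return i'  (fuel = limit - i)
def bScan (ok : Nat → Bool) (i fuel : Nat) : Nat :=
  match fuel with
  | 0 => i
  | f + 1 => if ok i then bScan ok (i + 1) f else i

-- min() of a nonempty sequence ([] unreachable: words ≠ [])
def pyMinNat : List Nat → Nat
  | [] => 0
  | x :: xs => xs.foldl min x

def get_stem_alt (words : List String) : List String :=
  match words with
  | [] => []
  | w0 :: _ =>
    let c0 := w0.toList
    let cs := words.map String.toList
    let n := pyMinNat (cs.map List.length)
    -- w[i] / w[len(w)-1-i] are in range at every tested index (i < n ≤ len w, resp. i < n - p); getD is exact there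
    let p := bScan (fun i => cs.all (fun w => w.getD i ' ' == c0.getD i ' ')) 0 n
    let s := bScan (fun i => cs.all (fun w => w.getD (w.length - 1 - i) ' ' == c0.getD (c0.length - 1 - i) ' ')) 0 (n - p)
    words.map (fun w => PySem.Str.slice w (some (p : Int)) (some ((w.length : Int) - (s : Int))))   -- w[p:len(w)-s]

-- ===== PRECONDITION & SPEC =====
def Spec_get_stem (words : List String) (out : List String) : Prop := out = get_stem_alt words
instance (words : List String) (out : List String) : Decidable (Spec_get_stem words out) := by unfold Spec_get_stem; infer_instance

-- ===== CLAIM (what is proved, stated in full; the proofs are below) =====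
def Claim_equal_get_stem : Prop := ∀ (words : List String), Dom_get_stem words → Spec_get_stem words (get_stem words)

-- ===== LEMMAS AND PROOFS =====

-- longest common prefix of two char lists
def lcp2 : List Char → List Char → List Char
  | c :: cs, d :: ds => if c = d then c :: lcp2 cs ds else []
  | _, _ => []

-- longest common prefix of a nonempty family, head as seed
def lcpA : List (List Char) → List Char
  | [] => []
  | c :: t => t.foldl lcp2 c

lemma lcp2_nil_left (b : List Char) : lcp2 [] b = [] := by cases b <;> rfl

lemma lcp2_nil_right (a : List Char) : lcp2 a [] = [] := by cases a <;> rfl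

lemma lcp2_prefix_left : ∀ a b : List Char, lcp2 a b <+: a := by
  intro a
  induction a with
  | nil => intro b; simp [lcp2_nil_left]
  | cons c cs ih =>
    intro b
    cases b with
    | nil => simp [lcp2_nil_right]
    | cons d ds =>
      by_cases h : c = d
      · simpa [lcp2, h, List.cons_prefix_cons] using ih ds
      · simp [lcp2, h]

lemma lcp2_prefix_right : ∀ a b : List Char, lcp2 a b <+: b := by
  intro a
  induction a with
  | nil => intro b; simp [lcp2_nil_left]
  | cons c cs ih =>
    intro b
    cases b with
    | nil => simp [lcp2_nil_right]
    | cons d ds =>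
      by_cases h : c = d
      · subst h; simpa [lcp2, List.cons_prefix_cons] using ih ds
      · simp [lcp2, h]

lemma prefix_lcp2 : ∀ {p a b : List Char}, p <+: a → p <+: b → p <+: lcp2 a b := by
  intro p
  induction p with
  | nil => intro a b _ _; exact List.nil_prefix
  | cons x xs ih =>
    intro a b ha hb
    cases a with
    | nil => exact absurd ha (by simp)
    | cons c cs =>
      cases b with
      | nil => exact absurd hb (by simp)
      | cons d ds =>
        rw [List.cons_prefix_cons] at ha hb
        obtain ⟨rfl, ha'⟩ := ha
        obtain ⟨rfl, hb'⟩ := hb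
        simpa [lcp2, List.cons_prefix_cons] using ih ha' hb'

lemma foldl_lcp2_prefix_acc : ∀ (t : List (List Char)) (a : List Char), t.foldl lcp2 a <+: a := by
  intro t
  induction t with
  | nil => intro a; simp
  | cons w ws ih =>
    intro a
    exact (ih (lcp2 a w)).trans (lcp2_prefix_left a w)

lemma foldl_lcp2_prefix_mem : ∀ (t : List (List Char)) (a w : List Char), w ∈ t → t.foldl lcp2 a <+: w := by
  intro t
  induction t with
  | nil => intro a w h; simp at h
  | cons v vs ih =>
    intro a w h
    rcases List.mem_cons.1 h with rfl | h'
    · exact (foldl_lcp2_prefix_acc vs (lcp2 a w)).trans (lcp2_prefix_right a w)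
    · exact ih (lcp2 a v) w h'

lemma prefix_foldl_lcp2 : ∀ (t : List (List Char)) (a p : List Char),
    p <+: a → (∀ w ∈ t, p <+: w) → p <+: t.foldl lcp2 a := by
  intro t
  induction t with
  | nil => intro a p h _; simpa using h
  | cons v vs ih =>
    intro a p ha hall
    exact ih (lcp2 a v) p (prefix_lcp2 ha (hall v (by simp))) (fun w hw => hall w (by simp [hw]))

-- a strictly between: the common prefix of the extremes is a prefix of anything between them
lemma lcp2_between_lt : ∀ (w a b : List Char), a < w → w < b → lcp2 a b <+: w := by
  intro w
  induction w with
  | nil => intro a b h1 _; exact absurd h1 (List.not_lt_nil a)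
  | cons e ws ih =>
    intro a b h1 h2
    cases a with
    | nil => simp [lcp2_nil_left]
    | cons c cs =>
      cases b with
      | nil => exact absurd h2 (List.not_lt_nil _)
      | cons d ds =>
        by_cases hcd : c = d
        · subst hcd
          rcases List.cons_lt_cons_iff.1 h1 with hlt1 | ⟨hce, h1'⟩
          · rcases List.cons_lt_cons_iff.1 h2 with hlt2 | ⟨hed, h2'⟩
            · exact absurd (hlt1.trans hlt2) (lt_irrefl c)
            · rw [hed] at hlt1; exact absurd hlt1 (lt_irrefl c)
          · rcases List.cons_lt_cons_iff.1 h2 with hlt2 | ⟨hed, h2'⟩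
            · rw [← hce] at hlt2; exact absurd hlt2 (lt_irrefl c)
            · subst hce
              simpa [lcp2, List.cons_prefix_cons] using ih cs ds h1' h2'
        · simp [lcp2, hcd]

lemma lcp2_between (w a b : List Char) (h1 : a ≤ w) (h2 : w ≤ b) : lcp2 a b <+: w := by
  rcases eq_or_lt_of_le h1 with rfl | h1'
  · exact lcp2_prefix_left _ _
  · rcases eq_or_lt_of_le h2 with rfl | h2'
    · exact lcp2_prefix_right _ _
    · exact lcp2_between_lt w a b h1' h2'

-- A's indexed loop computes lcp2
lemma prefLoopA_spec : ∀ (u v pre pre' : List Char), pre.length = pre'.length →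
    prefLoopA (pre ++ u) (pre' ++ v) pre.length u = pre ++ lcp2 u v := by
  intro u
  induction u with
  | nil => intro v pre pre' _; simp [prefLoopA, lcp2_nil_left]
  | cons c cs ih =>
    intro v pre pre' hlen
    cases v with
    | nil =>
      have hget : PySem.List.pyGet? pre' ((pre.length : Nat) : Int) = none := by
        rw [PySem.List.pyGet?_natCast]
        exact List.getElem?_eq_none (by omega)
      simp only [prefLoopA, List.append_nil, hget, lcp2_nil_right]
      exact List.take_left
    | cons d ds =>
      have hget : PySem.List.pyGet? (pre' ++ d :: ds) ((pre.length : Nat) : Int) = some d := by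
        rw [hlen]; exact PySem.List.pyGet?_append_length pre' ds d
      by_cases hcd : c = d
      · subst hcd
        have hih := ih ds (pre ++ [c]) (pre' ++ [c]) (by simp [hlen])
        simp at hih
        simp only [prefLoopA, hget, lcp2, if_neg (show ¬(c ≠ c) by simp)]
        simpa using hih
      · simp only [prefLoopA, hget, if_pos hcd, lcp2, if_neg hcd, List.append_nil]
        exact List.take_left

lemma lcpA_prefix_mem (ws : List (List Char)) (w : List Char) (h : w ∈ ws) : lcpA ws <+: w := by
  cases ws with
  | nil => simp at h
  | cons c t =>
    rcases List.mem_cons.1 h with rfl | h'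
    · exact foldl_lcp2_prefix_acc t w
    · exact foldl_lcp2_prefix_mem t c w h'

lemma prefix_lcpA (ws : List (List Char)) (p : List Char) (hne : ws ≠ [])
    (hall : ∀ w ∈ ws, p <+: w) : p <+: lcpA ws := by
  cases ws with
  | nil => exact absurd rfl hne
  | cons c t =>
    exact prefix_foldl_lcp2 t c p (hall c (by simp)) (fun w hw => hall w (by simp [hw]))

-- A's get_prefix on a nonempty list is the longest common prefix of the whole family
lemma getPrefixA_toList (w0 : String) (t : List String) :
    (get_prefix_A (w0 :: t)).toList = lcpA ((w0 :: t).map String.toList) := by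
  obtain ⟨s1, hs1⟩ : ∃ s1, PySem.List.min? (w0 :: t) (fun x => x) = some s1 := by
    cases h : PySem.List.min? (w0 :: t) (fun x => x) with
    | none => exact absurd ((PySem.List.min?_eq_none_iff _ _).mp h) (by simp)
    | some m => exact ⟨m, rfl⟩
  obtain ⟨s2, hs2⟩ : ∃ s2, PySem.List.max? (w0 :: t) (fun x => x) = some s2 := by
    cases h : PySem.List.max? (w0 :: t) (fun x => x) with
    | none => exact absurd ((PySem.List.max?_eq_none_iff _ _).mp h) (by simp)
    | some m => exact ⟨m, rfl⟩
  have hmem1 := PySem.List.min?_mem hs1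
  have hmin := PySem.List.min?_isMin hs1
  have hmem2 := PySem.List.max?_mem hs2
  have hmax := PySem.List.max?_isMax hs2
  have hloop : prefLoopA s1.toList s2.toList 0 s1.toList = lcp2 s1.toList s2.toList := by
    simpa using prefLoopA_spec s1.toList s2.toList [] [] rfl
  simp only [get_prefix_A]
  rw [if_neg (by simp : ¬(w0 :: t = ([] : List String))), hs1, hs2]
  simp only [Option.getD_some]
  rw [String.toList_ofList, hloop]
  have hfwd : lcp2 s1.toList s2.toList <+: lcpA ((w0 :: t).map String.toList) := by
    apply prefix_lcpA _ _ (by simp)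
    intro w hw
    obtain ⟨y, hy, rfl⟩ := List.mem_map.1 hw
    exact lcp2_between y.toList s1.toList s2.toList
      (String.le_iff_toList_le.mp (hmin y hy)) (String.le_iff_toList_le.mp (hmax y hy))
  have hbwd : lcpA ((w0 :: t).map String.toList) <+: lcp2 s1.toList s2.toList :=
    prefix_lcp2 (lcpA_prefix_mem _ _ (List.mem_map_of_mem hmem1))
      (lcpA_prefix_mem _ _ (List.mem_map_of_mem hmem2))
  exact hfwd.eq_of_length_le hbwd.length_le

-- extending a common prefix by one agreeing character
lemma prefix_snoc (L w : List Char) (x : Char) (hpre : L <+: w) (hlt : L.length < w.length)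
    (hx : w.getD L.length ' ' = x) : L ++ [x] <+: w := by
  obtain ⟨r, rfl⟩ := hpre
  cases r with
  | nil => simp at hlt
  | cons y r' =>
    have : (L ++ y :: r').getD L.length ' ' = y := by
      rw [List.getD_eq_getElem _ _ (by simp)]
      simp
    rw [this] at hx
    subst hx
    exact ⟨r', by simp⟩

-- maximality: below the minimum length, all words cannot agree at column (lcpA ws).length
lemma lcpA_max (ws : List (List Char)) (c0 : List Char) (hhead : ws.head? = some c0)
    (hlt : ∀ w ∈ ws, (lcpA ws).length < w.length)
    (hagree : ∀ w ∈ ws, w.getD (lcpA ws).length ' ' = c0.getD (lcpA ws).length ' ') : False := by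
  cases ws with
  | nil => simp at hhead
  | cons h t =>
    have hc0 : h = c0 := by simpa using hhead
    subst hc0
    set L := lcpA (h :: t) with hL
    set x := h.getD L.length ' ' with hx
    have hext : ∀ w ∈ h :: t, L ++ [x] <+: w := by
      intro w hw
      exact prefix_snoc L w x (lcpA_prefix_mem _ w hw) (hlt w hw) (hagree w hw)
    have : L ++ [x] <+: L := prefix_lcpA _ _ (by simp) hext
    have := this.length_le
    simp at this

-- generic while-loop scan: runs to exactly the characterized stopping point
lemma bScan_spec (ok : Nat → Bool) (n pstar : Nat) (h1 : pstar ≤ n)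
    (h2 : ∀ j, j < pstar → ok j = true) (h3 : pstar < n → ok pstar = false) :
    ∀ (fuel q : Nat), fuel = n - q → q ≤ pstar → bScan ok q fuel = pstar := by
  intro fuel
  induction fuel with
  | zero =>
    intro q hf hq
    have : q = pstar := by omega
    simpa [bScan] using this
  | succ f ihf =>
    intro q hf hq
    rcases lt_or_eq_of_le hq with hlt | rfl
    · rw [bScan, h2 q hlt, if_pos rfl]
      exact ihf (q + 1) (by omega) (by omega)
    · have hqn : q < n := by omega
      rw [bScan, h3 hqn]
      simp

-- value of getD inside a common prefix
lemma getD_eq_of_prefix (L w : List Char) (j : Nat) (h : L <+: w) (hj : j < L.length) :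
    w.getD j ' ' = L.getD j ' ' := by
  rw [List.getD_eq_getElem _ _ (lt_of_lt_of_le hj h.length_le), List.getD_eq_getElem _ _ hj]
  exact (h.getElem hj).symm

lemma pyMinNat_le (x : Nat) (xs : List Nat) : ∀ y ∈ x :: xs, pyMinNat (x :: xs) ≤ y := by
  intro y hy
  rcases List.mem_cons.1 hy with rfl | h
  · exact (PySem.List.foldl_min_le xs y).1
  · exact (PySem.List.foldl_min_le xs x).2 y h

lemma pyMinNat_mem (x : Nat) (xs : List Nat) : pyMinNat (x :: xs) ∈ x :: xs := by
  rcases PySem.List.foldl_min_mem xs x with h | h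
  · simp [pyMinNat, h]
  · exact List.mem_cons_of_mem x (by simpa [pyMinNat] using h)

-- the scan stops exactly at the length of the longest common prefix of the family
lemma bScan_lcpA (c0 : List Char) (cr : List (List Char)) (n : Nat)
    (hnle : ∀ w ∈ c0 :: cr, n ≤ w.length) (hnmem : ∃ w ∈ c0 :: cr, w.length = n)
    (ok : Nat → Bool)
    (hok : ∀ j, j < n → (ok j = true ↔ ∀ w ∈ c0 :: cr, w.getD j ' ' = c0.getD j ' ')) :
    bScan ok 0 n = (lcpA (c0 :: cr)).length := by
  have hLpre : ∀ w ∈ c0 :: cr, lcpA (c0 :: cr) <+: w := fun w hw => lcpA_prefix_mem _ w hw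
  have h1 : (lcpA (c0 :: cr)).length ≤ n := by
    obtain ⟨w, hw, hwn⟩ := hnmem
    exact hwn ▸ (hLpre w hw).length_le
  have h2 : ∀ j, j < (lcpA (c0 :: cr)).length → ok j = true := by
    intro j hj
    rw [hok j (lt_of_lt_of_le hj h1)]
    intro w hw
    rw [getD_eq_of_prefix _ w j (hLpre w hw) hj, getD_eq_of_prefix _ c0 j (hLpre c0 (by simp)) hj]
  have h3 : (lcpA (c0 :: cr)).length < n → ok (lcpA (c0 :: cr)).length = false := by
    intro hln
    by_contra hok'
    have htrue : ok (lcpA (c0 :: cr)).length = true := by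
      revert hok'; cases ok (lcpA (c0 :: cr)).length <;> simp
    rw [hok _ hln] at htrue
    exact lcpA_max (c0 :: cr) c0 (by simp) (fun w hw => lt_of_lt_of_le hln (hnle w hw)) htrue
  exact bScan_spec ok n (lcpA (c0 :: cr)).length h1 h2 h3 n 0 (by omega) (by omega)

-- B's forward scan = length of A's common prefix
lemma scanP_eq (w0 : String) (t : List String) :
    bScan (fun i => ((w0 :: t).map String.toList).all
        (fun w => w.getD i ' ' == w0.toList.getD i ' ')) 0
      (pyMinNat (((w0 :: t).map String.toList).map List.length))
      = (lcpA ((w0 :: t).map String.toList)).length := by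
  rw [List.map_cons, List.map_cons]
  apply bScan_lcpA
  · intro w hw
    have hm := List.mem_map_of_mem (f := List.length) hw
    rw [List.map_cons] at hm
    exact pyMinNat_le _ _ _ hm
  · have hm := pyMinNat_mem w0.toList.length ((t.map String.toList).map List.length)
    rw [show w0.toList.length :: (t.map String.toList).map List.length
        = (w0.toList :: t.map String.toList).map List.length from (List.map_cons ..).symm] at hm
    obtain ⟨w, hw, hweq⟩ := List.mem_map.1 hm
    exact ⟨w, hw, hweq⟩
  · intro j _
    simp only [List.all_eq_true, beq_iff_eq]

-- reading the reversed stripped word from the back of the original word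
lemma back_getD (w : List Char) (p j : Nat) (hj : j < w.length - p) :
    ((w.drop p).reverse).getD j ' ' = w.getD (w.length - 1 - j) ' ' := by
  rw [List.getD_eq_getElem _ _ (by simp; omega), List.getD_eq_getElem _ _ (by omega)]
  rw [List.getElem_reverse, List.getElem_drop]
  exact getElem_congr_idx (by simp; omega)

-- B's backward scan = length of A's common suffix of the stripped words
lemma scanS_eq (w0 : String) (t : List String) (p : Nat) :
    bScan (fun i => ((w0 :: t).map String.toList).all
        (fun w => w.getD (w.length - 1 - i) ' ' == w0.toList.getD (w0.toList.length - 1 - i) ' ')) 0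
      (pyMinNat (((w0 :: t).map String.toList).map List.length) - p)
      = (lcpA (((w0 :: t).map String.toList).map (fun w => (w.drop p).reverse))).length := by
  rw [List.map_cons, List.map_cons, List.map_cons]
  have hnle : ∀ w ∈ w0.toList :: t.map String.toList,
      pyMinNat (w0.toList.length :: (t.map String.toList).map List.length) ≤ w.length := by
    intro w hw
    have hm := List.mem_map_of_mem (f := List.length) hw
    rw [List.map_cons] at hm
    exact pyMinNat_le _ _ _ hm
  have hshape : (List.drop p w0.toList).reverse
        :: (t.map String.toList).map (fun w => (List.drop p w).reverse)
      = (w0.toList :: t.map String.toList).map (fun w => (List.drop p w).reverse) := by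
    simp
  apply bScan_lcpA
  · intro rw hrw
    rw [hshape] at hrw
    obtain ⟨w, hw, rfl⟩ := List.mem_map.1 hrw
    have := hnle w hw
    rw [List.length_reverse, List.length_drop]
    omega
  · have hm := pyMinNat_mem w0.toList.length ((t.map String.toList).map List.length)
    rw [show w0.toList.length :: (t.map String.toList).map List.length
        = (w0.toList :: t.map String.toList).map List.length from (List.map_cons ..).symm] at hm
    obtain ⟨w, hw, hweq⟩ := List.mem_map.1 hm
    refine ⟨(w.drop p).reverse, ?_,
      by rw [List.length_reverse, List.length_drop, hweq, List.map_cons]⟩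
    rw [hshape]
    exact List.mem_map_of_mem hw
  · intro j hj
    simp only [List.all_eq_true, beq_iff_eq]
    constructor
    · intro h rw hrw
      rw [hshape] at hrw
      obtain ⟨w, hw, rfl⟩ := List.mem_map.1 hrw
      rw [back_getD w p j (by have := hnle w hw; omega),
        back_getD w0.toList p j (by have := hnle w0.toList (by simp); omega)]
      exact h w hw
    · intro h w hw
      have h1 := h ((w.drop p).reverse) (by rw [hshape]; exact List.mem_map_of_mem hw)
      rw [back_getD w p j (by have := hnle w hw; omega),
        back_getD w0.toList p j (by have := hnle w0.toList (by simp); omega)] at h1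
      exact h1

-- A's first stage equals dropping the prefix length, with or without the guard
lemma stage1_eq (w0 : String) (t : List String) (p : Nat) :
    (if 0 < p then (w0 :: t).map (fun x => PySem.Str.slice x (some (p : Int)) none) else (w0 :: t))
      = (w0 :: t).map (fun x => String.ofList (x.toList.drop p)) := by
  by_cases hp0 : 0 < p
  · rw [if_pos hp0]
    refine List.map_congr_left (fun x _ => ?_)
    apply String.toList_inj.mp
    rw [PySem.Str.toList_slice, PySem.Chars.slice_eq_listSlice, String.toList_ofList,
      PySem.List.slice_from_natCast]
  · rw [if_neg hp0]
    have hp : p = 0 := by omega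
    subst hp
    simp [String.ofList_toList]

-- A's suffix of the stripped words, as the reversed common prefix of the reversed stripped words
lemma sufA_eq (w0 : String) (t : List String) (p : Nat) :
    get_suffix_A ((w0 :: t).map (fun x => String.ofList (x.toList.drop p)))
      = String.ofList (lcpA (((w0 :: t).map String.toList).map
          (fun w => (w.drop p).reverse))).reverse := by
  have hlist : ((w0 :: t).map (fun x => String.ofList (x.toList.drop p))).map
        (fun x => String.ofList x.toList.reverse)
      = (w0 :: t).map (fun x => String.ofList (x.toList.drop p).reverse) := by
    rw [List.map_map]
    exact List.map_congr_left (fun x _ => by simp [Function.comp, String.toList_ofList])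
  simp only [get_suffix_A]
  rw [if_neg (by simp), hlist]
  rw [show (w0 :: t).map (fun x => String.ofList (x.toList.drop p).reverse)
      = String.ofList (w0.toList.drop p).reverse
        :: t.map (fun x => String.ofList (x.toList.drop p).reverse) from List.map_cons ..]
  rw [getPrefixA_toList]
  congr 3
  simp [List.map_map, Function.comp, String.toList_ofList]

-- A's second stage equals B's single slice
lemma stage2_eq (w0 : String) (t : List String) (p s : Nat)
    (hsle : ∀ x ∈ w0 :: t, s ≤ x.toList.length - p) :
    (if 0 < s then ((w0 :: t).map (fun x => String.ofList (x.toList.drop p))).map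
        (fun x => PySem.Str.slice x (some 0) (some ((x.length : Int) - (s : Int))))
      else (w0 :: t).map (fun x => String.ofList (x.toList.drop p)))
      = (w0 :: t).map (fun w => PySem.Str.slice w (some (p : Int)) (some ((w.length : Int) - (s : Int)))) := by
  have hRHS : ∀ x ∈ w0 :: t, PySem.Str.slice x (some (p : Int)) (some ((x.length : Int) - (s : Int)))
      = String.ofList ((x.toList.drop p).take (x.toList.length - p - s)) := by
    intro x hx
    apply String.toList_inj.mp
    rw [PySem.Str.toList_slice, PySem.Chars.slice_eq_listSlice, String.toList_ofList]
    have hxlen : (x.length : Int) - (s : Int) = ((x.toList.length - s : Nat) : Int) := by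
      rw [← String.length_toList]
      have := hsle x hx
      omega
    rw [hxlen, PySem.List.slice_natCast]
    congr 1
    omega
  by_cases hs0 : 0 < s
  · rw [if_pos hs0, List.map_map]
    refine List.map_congr_left (fun x hx => ?_)
    rw [hRHS x hx]
    apply String.toList_inj.mp
    simp only [Function.comp_apply]
    rw [PySem.Str.toList_slice, PySem.Chars.slice_eq_listSlice]
    have hlen : ((String.ofList (x.toList.drop p)).length : Int) - (s : Int)
        = ((x.toList.length - p - s : Nat) : Int) := by
      rw [String.length_eq_list_length, List.length_drop]
      have := hsle x hx
      omega
    rw [hlen, PySem.List.slice_zero_start, PySem.List.slice_to_natCast,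
      String.toList_ofList, String.toList_ofList]
  · rw [if_neg hs0]
    have hs : s = 0 := by omega
    subst hs
    refine List.map_congr_left (fun x hx => ?_)
    rw [hRHS x hx]
    congr 1
    exact (List.take_of_length_le (by simp)).symm

lemma main_eq (w0 : String) (t : List String) : get_stem (w0 :: t) = get_stem_alt (w0 :: t) := by
  obtain ⟨p, hpdef⟩ : ∃ p, (lcpA ((w0 :: t).map String.toList)).length = p := ⟨_, rfl⟩
  obtain ⟨s, hsdef⟩ : ∃ s,
      (lcpA (((w0 :: t).map String.toList).map (fun w => (w.drop p).reverse))).length = s := ⟨_, rfl⟩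
  have hsle : ∀ x ∈ w0 :: t, s ≤ x.toList.length - p := by
    intro x hx
    rw [← hsdef]
    have := (lcpA_prefix_mem (((w0 :: t).map String.toList).map (fun w => (w.drop p).reverse))
      ((x.toList.drop p).reverse)
      (List.mem_map_of_mem (List.mem_map_of_mem hx))).length_le
    simpa using this
  have hB : get_stem_alt (w0 :: t) = (w0 :: t).map
      (fun w => PySem.Str.slice w (some (p : Int)) (some ((w.length : Int) - (s : Int)))) := by
    simp only [get_stem_alt]
    rw [scanP_eq, hpdef, scanS_eq, hsdef]
  have hplen : (get_prefix_A (w0 :: t)).length = p := by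
    rw [← String.length_toList, getPrefixA_toList, hpdef]
  have hsuflen : (get_suffix_A ((w0 :: t).map (fun x => String.ofList (x.toList.drop p)))).length = s := by
    rw [sufA_eq, String.length_eq_list_length, List.length_reverse, hsdef]
  rw [hB]
  simp only [get_stem]
  rw [hplen, stage1_eq, hsuflen]
  exact stage2_eq w0 t p s hsle

-- ===== VERDICT (by name: the statement is the Claim_ definition above) =====
theorem get_stem_spec : Claim_equal_get_stem := by
  intro words _h
  unfold Spec_get_stem
  cases words with
  | nil => rfl
  | cons w0 t => exact main_eq w0 t
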